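-- pv_equiv track=rewrite | github.com/sooyeun-park/project.d- | code.py | d_pivo
-- ===== SOURCE A (Python) =====
-- def d_pivo(ip):
--     pivo_dict = {}
--     for i in range(0,ip):
--         if i == 0 :
--             pivo_dict['F0'] = 0
--         elif i == 1 :
--             pivo_dict['F1'] = 1
--         elif i > 1 :
--             pivo_dict['F'+str(i)] = (pivo_dict['F'+str(i-2)]+pivo_dict['F'+str(i-1)])
--     return pivo_dict
-- ===== SOURCE B (Python) =====
-- def d_pivo(ip):
--     # Rolling-pair Fibonacci: the dict is built from a pair list and is never
--     # read back from; the recurrence state is the two scalars a, b.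
--     pairs = []
--     a, b = 0, 1
--     for i in range(ip):
--         pairs.append(('F' + str(i), a))
--         a, b = b, a + b
--     return dict(pairs)
-- ===== Notes on version B (the rewrite author's own statement) =====
-- stated objective: simpler
-- what changed: B keeps the previous two Fibonacci numbers in two rolling integers and appends ('F'+str(i), a) pairs, building the dict once at the end; A's dict stops being its own memo table read back by string-keyed lookups.
import Mathlib
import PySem

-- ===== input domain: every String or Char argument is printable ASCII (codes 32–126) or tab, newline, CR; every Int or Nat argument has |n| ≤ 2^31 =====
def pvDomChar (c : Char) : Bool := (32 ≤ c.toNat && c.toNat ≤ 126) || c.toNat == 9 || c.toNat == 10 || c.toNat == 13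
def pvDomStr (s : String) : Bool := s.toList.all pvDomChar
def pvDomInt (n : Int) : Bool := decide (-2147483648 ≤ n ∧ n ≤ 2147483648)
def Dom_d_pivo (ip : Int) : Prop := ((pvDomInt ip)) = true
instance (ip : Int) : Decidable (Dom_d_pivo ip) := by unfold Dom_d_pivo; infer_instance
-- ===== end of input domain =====

-- B replaces A's read-back-from-the-dict recurrence by two rolling integers and a pair list
-- turned into a dict once at the end (objective: simpler).

-- ===== PORT A =====
-- A's dict lookups pivo_dict['F'+str(i-2)] / ['F'+str(i-1)] are ported with getD _ 0:
-- both keys were inserted on earlier iterations, so Python's d[k] never raises here.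
def d_pivo (ip : Int) : List (String × Int) :=
  ((PySem.List.pyRange 0 ip 1).foldl
    (fun d i =>
      if i = 0 then d.insert "F0" 0
      else if i = 1 then d.insert "F1" 1
      else if i > 1 then
        d.insert ("F" ++ PySem.Int.toStr i)
          (d.getD ("F" ++ PySem.Int.toStr (i - 2)) 0 + d.getD ("F" ++ PySem.Int.toStr (i - 1)) 0)
      else d)
    (PySem.Dict.empty : PySem.Dict String Int)).items

-- ===== PORT B =====
-- the loop of Source B: i counts up, (a, b) are the rolling pair, n is the remaining iterations
def fibPairs (i : Nat) (a b : Int) : Nat → List (String × Int)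
  | 0 => []
  | n + 1 => ("F" ++ PySem.Int.toStr (i : Int), a) :: fibPairs (i + 1) b (a + b) n

def d_pivo_alt (ip : Int) : List (String × Int) :=
  (PySem.Dict.ofList (fibPairs 0 0 1 ip.toNat)).items

-- ===== PRECONDITION & SPEC =====
def Spec_d_pivo (ip : Int) (out : List (String × Int)) : Prop := out = d_pivo_alt ip
instance (ip : Int) (out : List (String × Int)) : Decidable (Spec_d_pivo ip out) := by unfold Spec_d_pivo; infer_instance

-- ===== CLAIM (what is proved, stated in full; the proofs are below) =====
def Claim_equal_d_pivo : Prop := ∀ (ip : Int), Dom_d_pivo ip → Spec_d_pivo ip (d_pivo ip)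

-- ===== LEMMAS AND PROOFS =====

-- decimal digit characters are distinct
theorem digitChar_inj {a b : Nat} (ha : a < 10) (hb : b < 10) :
    Nat.digitChar a = Nat.digitChar b → a = b := by
  interval_cases a <;> interval_cases b <;> decide

-- the most-significant-digit-first decimal digit list, by structural recursion
def myDigits (n : Nat) : List Char :=
  if n < 10 then [Nat.digitChar n]
  else myDigits (n / 10) ++ [Nat.digitChar (n % 10)]
decreasing_by exact Nat.div_lt_self (by omega) (by omega)

theorem myDigits_ne_nil (n : Nat) : myDigits n ≠ [] := by
  unfold myDigits; split <;> simp

theorem myDigits_of_lt {n : Nat} (h : n < 10) : myDigits n = [Nat.digitChar n] := by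
  conv_lhs => rw [myDigits]
  rw [if_pos h]

theorem myDigits_of_ge {n : Nat} (h : ¬ n < 10) :
    myDigits n = myDigits (n / 10) ++ [Nat.digitChar (n % 10)] := by
  conv_lhs => rw [myDigits]
  rw [if_neg h]

theorem toDigitsCore_append (f : Nat) : ∀ (n : Nat) (ds : List Char),
    Nat.toDigitsCore 10 f n ds = Nat.toDigitsCore 10 f n [] ++ ds := by
  induction f with
  | zero => intro n ds; simp [Nat.toDigitsCore]
  | succ f ih =>
    intro n ds
    simp only [Nat.toDigitsCore]
    split
    · rfl
    · rw [ih (n / 10) [Nat.digitChar (n % 10)],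
        ih (n / 10) (Nat.digitChar (n % 10) :: ds), List.append_assoc]
      rfl

theorem toDigitsCore_eq_myDigits (f : Nat) : ∀ n : Nat, n < f →
    Nat.toDigitsCore 10 f n [] = myDigits n := by
  induction f with
  | zero => intro n h; omega
  | succ f ih =>
    intro n h
    simp only [Nat.toDigitsCore]
    split
    · rename_i h0
      have hlt : n < 10 := by omega
      rw [myDigits_of_lt hlt, Nat.mod_eq_of_lt hlt]
    · rename_i h0
      have h10 : 10 ≤ n := by by_contra hc; exact h0 (Nat.div_eq_of_lt (by omega))
      have hfuel : n / 10 < f := by omega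
      rw [toDigitsCore_append, ih (n / 10) hfuel, myDigits_of_ge (n := n) (by omega)]

theorem toDigits_eq_myDigits (n : Nat) : Nat.toDigits 10 n = myDigits n :=
  toDigitsCore_eq_myDigits (n + 1) n (Nat.lt_succ_self n)

theorem myDigits_inj : ∀ m n : Nat, myDigits m = myDigits n → m = n := by
  intro m
  induction m using Nat.strong_induction_on with
  | _ m ih =>
    intro n h
    by_cases hm : m < 10 <;> by_cases hn : n < 10
    · rw [myDigits_of_lt hm, myDigits_of_lt hn] at h
      simp only [List.cons.injEq, and_true] at h
      exact digitChar_inj hm hn h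
    · rw [myDigits_of_lt hm, myDigits_of_ge hn] at h
      have := congrArg List.length h
      simp [myDigits_ne_nil] at this
    · rw [myDigits_of_ge hm, myDigits_of_lt hn] at h
      have := congrArg List.length h
      simp [myDigits_ne_nil] at this
    · rw [myDigits_of_ge hm, myDigits_of_ge hn] at h
      rw [← List.concat_eq_append, ← List.concat_eq_append] at h
      obtain ⟨h1, h2⟩ := List.concat_inj.mp h
      have hd : m / 10 = n / 10 :=
        ih (m / 10) (Nat.div_lt_self (by omega) (by omega)) _ h1
      have hr : m % 10 = n % 10 :=
        digitChar_inj (Nat.mod_lt _ (by omega)) (Nat.mod_lt _ (by omega)) h2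
      omega

theorem toStr_inj_nonneg {m n : Int} (hm : 0 ≤ m) (hn : 0 ≤ n)
    (h : PySem.Int.toStr m = PySem.Int.toStr n) : m = n := by
  have h' := congrArg String.toList h
  rw [PySem.Int.toList_toStr, PySem.Int.toList_toStr] at h'
  unfold PySem.Int.toChars at h'
  rw [if_neg (by omega), if_neg (by omega), toDigits_eq_myDigits, toDigits_eq_myDigits] at h'
  have := myDigits_inj _ _ h'
  omega

-- the key 'F' + str(k)
def fkey (k : Nat) : String := "F" ++ PySem.Int.toStr (k : Int)

theorem fkey_inj {j k : Nat} (h : fkey j = fkey k) : j = k := by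
  unfold fkey at h
  have h' := congrArg String.toList h
  rw [String.toList_append, String.toList_append] at h'
  have h'' : (PySem.Int.toStr (j : Int)).toList = (PySem.Int.toStr (k : Int)).toList :=
    List.append_cancel_left h'
  have : PySem.Int.toStr (j : Int) = PySem.Int.toStr (k : Int) := by
    cases hj : PySem.Int.toStr (j : Int); cases hk : PySem.Int.toStr (k : Int)
    simp_all [String.toList]
  have := toStr_inj_nonneg (by omega) (by omega) this
  omega

-- mathematical Fibonacci on Int
def fib : Nat → Int
  | 0 => 0
  | 1 => 1
  | n + 2 => fib n + fib (n + 1)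

-- the dict both loops build, as a fold over List.range
def fdict (n : Nat) : PySem.Dict String Int :=
  (List.range n).foldl (fun d k => d.insert (fkey k) (fib k)) PySem.Dict.empty

theorem fdict_succ (n : Nat) : fdict (n + 1) = (fdict n).insert (fkey n) (fib n) := by
  unfold fdict; rw [List.range_succ, List.foldl_append]; rfl

theorem getD_fdict {j n : Nat} (h : j < n) : (fdict n).getD (fkey j) 0 = fib j := by
  induction n with
  | zero => omega
  | succ n ih =>
    rw [fdict_succ, PySem.Dict.getD_insert]
    by_cases hj : j = n
    · subst hj; simp
    · rw [if_neg (fun he => hj (fkey_inj he))]; exact ih (by omega)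

-- B's pair list with consecutive-Fibonacci seeds, as a map over List.range
theorem fibPairs_eq_map (n : Nat) : ∀ i : Nat,
    fibPairs i (fib i) (fib (i + 1)) n
      = (List.range n).map (fun k => (fkey (i + k), fib (i + k))) := by
  induction n with
  | zero => intro i; rfl
  | succ n ih =>
    intro i
    have hstep : fib i + fib (i + 1) = fib (i + 2) := rfl
    show (fkey i, fib i) :: fibPairs (i + 1) (fib (i + 1)) (fib i + fib (i + 1)) n = _
    rw [hstep, ih (i + 1), List.range_succ_eq_map]
    simp only [List.map_cons, List.map_map, Nat.add_zero]
    congr 1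
    apply List.map_congr_left
    intro k _
    simp only [Function.comp_apply, Nat.succ_eq_add_one]
    have : i + 1 + k = i + (k + 1) := by omega
    rw [this]

theorem ofList_fibPairs (n : Nat) : PySem.Dict.ofList (fibPairs 0 0 1 n) = fdict n := by
  have h0 : fibPairs 0 0 1 n = (List.range n).map (fun k => (fkey k, fib k)) := by
    have := fibPairs_eq_map n 0
    simpa [fib] using this
  rw [h0]
  show ((List.range n).map fun k => (fkey k, fib k)).foldl
      (fun acc p => acc.insert p.1 p.2) PySem.Dict.empty = fdict n
  rw [List.foldl_map]
  rfl

-- A's loop over range(0, n) builds exactly fdict n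
theorem dpivo_loop_eq (n : Nat) :
    (PySem.List.pyRange 0 (n : Int) 1).foldl
      (fun d i =>
        if i = 0 then d.insert "F0" 0
        else if i = 1 then d.insert "F1" 1
        else if i > 1 then
          d.insert ("F" ++ PySem.Int.toStr i)
            (d.getD ("F" ++ PySem.Int.toStr (i - 2)) 0 + d.getD ("F" ++ PySem.Int.toStr (i - 1)) 0)
        else d)
      (PySem.Dict.empty : PySem.Dict String Int) = fdict n := by
  induction n with
  | zero => rw [PySem.List.pyRange_one_eq_nil (by omega)]; rfl
  | succ n ih =>
    have hcast : ((n + 1 : Nat) : Int) = (n : Int) + 1 := by push_cast; ring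
    rw [hcast, PySem.List.pyRange_one_succ_right (by omega), List.foldl_append, ih]
    simp only [List.foldl_cons, List.foldl_nil]
    match n with
    | 0 =>
      conv_rhs => rw [fdict_succ]
      norm_num
      rfl
    | 1 =>
      conv_rhs => rw [fdict_succ]
      norm_num
      rfl
    | (m + 2) =>
      have h0 : ¬ ((m + 2 : Nat) : Int) = 0 := by push_cast; omega
      have h1 : ¬ ((m + 2 : Nat) : Int) = 1 := by push_cast; omega
      have h2 : ((m + 2 : Nat) : Int) > 1 := by push_cast; omega
      rw [if_neg h0, if_neg h1, if_pos h2]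
      conv_rhs => rw [fdict_succ]
      have e2 : ((m + 2 : Nat) : Int) - 2 = ((m : Nat) : Int) := by push_cast; ring
      have e1 : ((m + 2 : Nat) : Int) - 1 = ((m + 1 : Nat) : Int) := by push_cast; ring
      rw [e2, e1]
      have g2 : (fdict (m + 2)).getD ("F" ++ PySem.Int.toStr ((m : Nat) : Int)) 0 = fib m :=
        getD_fdict (by omega)
      have g1 : (fdict (m + 2)).getD ("F" ++ PySem.Int.toStr ((m + 1 : Nat) : Int)) 0
          = fib (m + 1) := getD_fdict (by omega)
      rw [g2, g1]
      rfl

-- ===== VERDICT (by name: the statement is the Claim_ definition above) =====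
theorem d_pivo_spec : Claim_equal_d_pivo := by
  intro ip _
  unfold Spec_d_pivo d_pivo d_pivo_alt
  rw [ofList_fibPairs]
  by_cases h : 0 ≤ ip
  · lift ip to Nat using h with n
    rw [Int.toNat_natCast, dpivo_loop_eq]
  · rw [PySem.List.pyRange_one_eq_nil (by omega)]
    have : ip.toNat = 0 := by omega
    rw [this]
    rfl
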